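-- pv_equiv track=rewrite | github.com/daniel-mf-92/holyc-inference | tests/test_softmax_topp_select_logit_cutoff_checked.py | fpq16_topp_select_prefix_len_checked_reference
-- ===== SOURCE A (Python) =====
-- FP_Q16_ONE = 1 << 16
--
-- FP_Q16_OK = 0
--
-- FP_Q16_ERR_NULL_PTR = 1
--
-- FP_Q16_ERR_BAD_PARAM = 2
--
-- FP_Q16_ERR_OVERFLOW = 4
--
-- I64_MAX_VALUE = 0x7FFFFFFFFFFFFFFF
--
-- U64_MAX_VALUE = 0xFFFFFFFFFFFFFFFF
--
-- def fpq16_topp_select_prefix_len_checked_reference(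
--     probs_q16: list[int] | None,
--     lane_count: int,
--     top_p_q16: int,
--     out_prefix_len: list[int] | None,
--     probs_addr: int = 0,
-- ) -> int:
--     if probs_q16 is None or out_prefix_len is None:
--         return FP_Q16_ERR_NULL_PTR
--     if lane_count <= 0:
--         return FP_Q16_ERR_BAD_PARAM
--     if top_p_q16 <= 0 or top_p_q16 > FP_Q16_ONE:
--         return FP_Q16_ERR_BAD_PARAM
--
--     last_index = lane_count - 1
--     if last_index > (I64_MAX_VALUE >> 3):
--         return FP_Q16_ERR_OVERFLOW
--     last_byte_offset = last_index << 3
--     if probs_addr > (U64_MAX_VALUE - last_byte_offset):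
--         return FP_Q16_ERR_OVERFLOW
--
--     if len(probs_q16) < lane_count:
--         return FP_Q16_ERR_BAD_PARAM
--
--     cumulative_q16 = 0
--     prev_cumulative_q16 = 0
--     prefix_len = -1
--     prev_prob_q16 = FP_Q16_ONE
--
--     for idx in range(lane_count):
--         p = probs_q16[idx]
--         if p < 0 or p > FP_Q16_ONE:
--             return FP_Q16_ERR_BAD_PARAM
--         if p > prev_prob_q16:
--             return FP_Q16_ERR_BAD_PARAM
--         if p > (I64_MAX_VALUE - cumulative_q16):
--             return FP_Q16_ERR_OVERFLOW
--
--         cumulative_q16 += p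
--         if cumulative_q16 < prev_cumulative_q16:
--             return FP_Q16_ERR_OVERFLOW
--         if cumulative_q16 > FP_Q16_ONE:
--             return FP_Q16_ERR_BAD_PARAM
--
--         if prefix_len < 0 and cumulative_q16 >= top_p_q16:
--             prefix_len = idx + 1
--
--         prev_prob_q16 = p
--         prev_cumulative_q16 = cumulative_q16
--
--     if cumulative_q16 != FP_Q16_ONE:
--         return FP_Q16_ERR_BAD_PARAM
--
--     if prefix_len < 0:
--         prefix_len = lane_count
--
--     out_prefix_len[0] = prefix_len
--     return FP_Q16_OK
-- ===== SOURCE B (Python) =====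
-- FP_Q16_ONE = 1 << 16
-- FP_Q16_OK = 0
-- FP_Q16_ERR_NULL_PTR = 1
-- FP_Q16_ERR_BAD_PARAM = 2
-- FP_Q16_ERR_OVERFLOW = 4
-- I64_MAX_VALUE = 0x7FFFFFFFFFFFFFFF
-- U64_MAX_VALUE = 0xFFFFFFFFFFFFFFFF
--
--
-- def fpq16_topp_select_prefix_len_checked_reference(
--     probs_q16,
--     lane_count,
--     top_p_q16,
--     out_prefix_len,
--     probs_addr=0,
-- ):
--     if probs_q16 is None or out_prefix_len is None:
--         return FP_Q16_ERR_NULL_PTR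
--     if lane_count <= 0:
--         return FP_Q16_ERR_BAD_PARAM
--     if top_p_q16 <= 0 or top_p_q16 > FP_Q16_ONE:
--         return FP_Q16_ERR_BAD_PARAM
--
--     last_index = lane_count - 1
--     if last_index > (I64_MAX_VALUE >> 3):
--         return FP_Q16_ERR_OVERFLOW
--     if probs_addr > (U64_MAX_VALUE - (last_index << 3)):
--         return FP_Q16_ERR_OVERFLOW
--
--     if len(probs_q16) < lane_count:
--         return FP_Q16_ERR_BAD_PARAM
--
--     xs = probs_q16[:lane_count]
--
--     # Staged declarative validation.  In the reference's single loop the overflow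
--     # checks can never fire (every accepted partial sum stays <= FP_Q16_ONE), and
--     # every reachable loop failure is BAD_PARAM; so validity of the distribution
--     # reduces to: non-negative entries, non-increasing order, total == FP_Q16_ONE.
--     if any(p < 0 for p in xs):
--         return FP_Q16_ERR_BAD_PARAM
--     if any(b > a for a, b in zip(xs, xs[1:])):
--         return FP_Q16_ERR_BAD_PARAM
--     if sum(xs) != FP_Q16_ONE:
--         return FP_Q16_ERR_BAD_PARAM
--
--     # Separate crossing scan with early break: first prefix reaching top_p_q16.
--     prefix_len = lane_count
--     cum = 0
--     for i, p in enumerate(xs):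
--         cum += p
--         if cum >= top_p_q16:
--             prefix_len = i + 1
--             break
--
--     out_prefix_len[0] = prefix_len
--     return FP_Q16_OK
-- ===== Notes on version B (the rewrite author's own statement) =====
-- stated objective: simpler
-- what changed: B replaces A's single stateful validation loop (running cumulative, prev-prob, inline crossing detection, in-loop overflow returns) by staged declarative checks -- any(p<0), any adjacent increase via zip, sum != ONE -- which is correct because A's in-loop overflow returns are unreachable (partial sums are kept <= ONE), followed by a separate early-break crossing scan for the prefix length.
-- outside the precondition, e.g. on fpq16_topp_select_prefix_len_checked_reference(None, 1, 65536, [], 0): A returns 1, B returns 1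
import Mathlib
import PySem

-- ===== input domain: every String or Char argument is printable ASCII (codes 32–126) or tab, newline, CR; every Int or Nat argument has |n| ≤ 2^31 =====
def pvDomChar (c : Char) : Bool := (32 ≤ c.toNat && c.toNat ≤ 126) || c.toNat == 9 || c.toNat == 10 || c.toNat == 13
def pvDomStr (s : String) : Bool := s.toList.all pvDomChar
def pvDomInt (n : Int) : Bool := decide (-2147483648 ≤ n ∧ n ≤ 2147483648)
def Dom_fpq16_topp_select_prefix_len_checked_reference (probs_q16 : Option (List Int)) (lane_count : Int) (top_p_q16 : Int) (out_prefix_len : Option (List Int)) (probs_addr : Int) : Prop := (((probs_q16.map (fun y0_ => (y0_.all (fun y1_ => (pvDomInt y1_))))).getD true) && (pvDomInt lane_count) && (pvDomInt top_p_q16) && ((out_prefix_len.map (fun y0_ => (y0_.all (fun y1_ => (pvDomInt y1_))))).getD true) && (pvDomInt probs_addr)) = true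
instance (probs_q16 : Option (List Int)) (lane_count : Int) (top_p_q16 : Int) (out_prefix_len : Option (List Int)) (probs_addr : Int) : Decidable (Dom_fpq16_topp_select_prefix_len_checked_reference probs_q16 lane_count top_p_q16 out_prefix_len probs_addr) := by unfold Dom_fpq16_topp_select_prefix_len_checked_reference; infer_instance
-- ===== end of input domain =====

-- B replaces A's single stateful validation loop by staged declarative checks
-- (non-negative, non-increasing, total = ONE) plus a separate crossing scan; both
-- Pythons also write the prefix length into out_prefix_len[0] — the equivalence
-- proved here is about the RETURN value only (B performs the same mutation).

-- ===== PORT A =====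
-- The validation loop of A: state (idx, cumulative, prev_cumulative, prefix_len, prev_prob),
-- fuel = remaining iterations of range(lane_count); returns error code or (cumulative, prefix_len).
def pvA_loop (top_p_q16 : Int) :
    List Int → Nat → Nat → Int → Int → Int → Int → Int ⊕ (Int × Int)
  | _, 0, _, cum, _, pfx, _ => .inr (cum, pfx)
  | [], _+1, _, cum, _, pfx, _ => .inr (cum, pfx)   -- unreachable: len ≥ lane_count is checked first
  | p :: rest, k+1, idx, cum, prevCum, pfx, prevP =>
    if p < 0 ∨ p > 65536 then .inl 2
    else if p > prevP then .inl 2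
    else if p > 9223372036854775807 - cum then .inl 4
    else
      let cum' := cum + p
      if cum' < prevCum then .inl 4
      else if cum' > 65536 then .inl 2
      else
        let pfx' := if pfx < 0 ∧ cum' ≥ top_p_q16 then (idx : Int) + 1 else pfx
        pvA_loop top_p_q16 rest k (idx + 1) cum' cum' pfx' p

-- The code of A after the loop (the out_prefix_len[0] write is a side effect; Pre_ excludes some []).
def pvA_finish (r : Int ⊕ (Int × Int)) (lane_count : Int) : Int :=
  match r with
  | .inl e => e
  | .inr (cum, pfx) =>
    if cum ≠ 65536 then 2
    else
      let pfx' := if pfx < 0 then lane_count else pfx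
      let _ := pfx'
      0

def fpq16_topp_select_prefix_len_checked_reference (probs_q16 : Option (List Int)) (lane_count : Int) (top_p_q16 : Int) (out_prefix_len : Option (List Int)) (probs_addr : Int) : Int :=
  match probs_q16, out_prefix_len with
  | none, _ => 1
  | _, none => 1
  | some probs, some _out =>
    if lane_count ≤ 0 then 2
    else if top_p_q16 ≤ 0 ∨ top_p_q16 > 65536 then 2
    else
      let last_index := lane_count - 1
      if last_index > 1152921504606846975 then 4    -- I64_MAX >> 3
      else if probs_addr > 18446744073709551615 - last_index * 8 then 4   -- << 3 on a nonnegative value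
      else if (probs.length : Int) < lane_count then 2
      else
        pvA_finish (pvA_loop top_p_q16 probs lane_count.toNat 0 0 0 (-1) 65536) lane_count

-- ===== PORT B =====
-- B's crossing scan with early break: first i with cum+p ≥ top, else the default lane_count.
def pvB_cross (top_p_q16 : Int) : List Int → Int → Nat → Int → Int
  | [], _, _, dflt => dflt
  | p :: rest, cum, i, dflt =>
    if cum + p ≥ top_p_q16 then (i : Int) + 1 else pvB_cross top_p_q16 rest (cum + p) (i + 1) dflt

-- B's staged tail on xs = probs_q16[:lane_count]: the three declarative checks, then the
-- crossing scan (which feeds only the out_prefix_len[0] write) and OK.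
def pvB_tail (top_p_q16 lane_count : Int) (xs : List Int) : Int :=
  if xs.any (fun p => decide (p < 0)) then 2
  else if (xs.zip (xs.drop 1)).any (fun ab => decide (ab.1 < ab.2)) then 2   -- zip(xs, xs[1:])
  else if xs.sum ≠ 65536 then 2
  else
    let pl := pvB_cross top_p_q16 xs 0 0 lane_count
    let _ := pl
    0

def fpq16_topp_select_prefix_len_checked_reference_alt (probs_q16 : Option (List Int)) (lane_count : Int) (top_p_q16 : Int) (out_prefix_len : Option (List Int)) (probs_addr : Int) : Int :=
  match probs_q16, out_prefix_len with
  | none, _ => 1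
  | _, none => 1
  | some probs, some _out =>
    if lane_count ≤ 0 then 2
    else if top_p_q16 ≤ 0 ∨ top_p_q16 > 65536 then 2
    else if lane_count - 1 > 1152921504606846975 then 4    -- I64_MAX >> 3
    else if probs_addr > 18446744073709551615 - (lane_count - 1) * 8 then 4   -- << 3 on a nonnegative value
    else if (probs.length : Int) < lane_count then 2
    else
      pvB_tail top_p_q16 lane_count (probs.take lane_count.toNat)   -- xs = probs_q16[:lane_count]

-- ===== PRECONDITION & SPEC =====
-- Pre_ excludes out_prefix_len = some [] only because both Pythons raise IndexError on the
-- final write out_prefix_len[0] whenever the distribution validates; on early-error inputs of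
-- that shape both programs return the same error code (see the cite in the claim).
def Pre_fpq16_topp_select_prefix_len_checked_reference (probs_q16 : Option (List Int)) (lane_count : Int) (top_p_q16 : Int) (out_prefix_len : Option (List Int)) (probs_addr : Int) : Prop :=
  out_prefix_len ≠ some ([] : List Int)
instance (probs_q16 : Option (List Int)) (lane_count : Int) (top_p_q16 : Int) (out_prefix_len : Option (List Int)) (probs_addr : Int) : Decidable (Pre_fpq16_topp_select_prefix_len_checked_reference probs_q16 lane_count top_p_q16 out_prefix_len probs_addr) := by unfold Pre_fpq16_topp_select_prefix_len_checked_reference; infer_instance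

def pvWitness_fpq16_topp_select_prefix_len_checked_reference : Option (List Int) × Int × Int × Option (List Int) × Int :=
  (some [65536], 1, 65536, some [0], 0)

def Spec_fpq16_topp_select_prefix_len_checked_reference (probs_q16 : Option (List Int)) (lane_count : Int) (top_p_q16 : Int) (out_prefix_len : Option (List Int)) (probs_addr : Int) (out : Int) : Prop := out = fpq16_topp_select_prefix_len_checked_reference_alt probs_q16 lane_count top_p_q16 out_prefix_len probs_addr
instance (probs_q16 : Option (List Int)) (lane_count : Int) (top_p_q16 : Int) (out_prefix_len : Option (List Int)) (probs_addr : Int) (out : Int) : Decidable (Spec_fpq16_topp_select_prefix_len_checked_reference probs_q16 lane_count top_p_q16 out_prefix_len probs_addr out) := by unfold Spec_fpq16_topp_select_prefix_len_checked_reference; infer_instance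

-- ===== CLAIM (what is proved, stated in full; the proofs are below) =====
def Claim_equal_fpq16_topp_select_prefix_len_checked_reference : Prop := ∀ (probs_q16 : Option (List Int)) (lane_count : Int) (top_p_q16 : Int) (out_prefix_len : Option (List Int)) (probs_addr : Int), Dom_fpq16_topp_select_prefix_len_checked_reference probs_q16 lane_count top_p_q16 out_prefix_len probs_addr → Pre_fpq16_topp_select_prefix_len_checked_reference probs_q16 lane_count top_p_q16 out_prefix_len probs_addr → Spec_fpq16_topp_select_prefix_len_checked_reference probs_q16 lane_count top_p_q16 out_prefix_len probs_addr (fpq16_topp_select_prefix_len_checked_reference probs_q16 lane_count top_p_q16 out_prefix_len probs_addr)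

-- ===== LEMMAS AND PROOFS =====

-- The condition under which A's validation loop runs to completion: each element is in
-- [0, ONE], ≤ its predecessor, and every partial sum stays ≤ ONE.
def pvChainOk : Int → Int → List Int → Bool
  | _, _, [] => true
  | prev, cum, p :: rest =>
    decide (0 ≤ p) && decide (p ≤ 65536) && decide (p ≤ prev) && decide (cum + p ≤ 65536)
      && pvChainOk p (cum + p) rest

-- A's loop either fails with BAD_PARAM or completes with cum + sum: given the invariant
-- 0 ≤ cum ≤ 65536, the two in-loop overflow returns (code 4) are unreachable.
theorem pvA_loop_char (top : Int) : ∀ (fuel : Nat) (l : List Int) (idx : Nat) (cum pfx prev : Int),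
    fuel ≤ l.length → 0 ≤ cum → cum ≤ 65536 →
    Sum.map id Prod.fst (pvA_loop top l fuel idx cum cum pfx prev)
      = if pvChainOk prev cum (l.take fuel) then .inr (cum + (l.take fuel).sum) else .inl 2 := by
  intro fuel
  induction fuel with
  | zero => intro l idx cum pfx prev _ _ _; simp [pvA_loop, pvChainOk]
  | succ k ih =>
    intro l idx cum pfx prev hlen hc0 hc1
    cases l with
    | nil => simp at hlen
    | cons p rest =>
      simp only [pvA_loop, List.take, pvChainOk, List.sum_cons]
      by_cases h1 : p < 0 ∨ 65536 < p
      · rw [if_pos h1]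
        have hf : (decide (0 ≤ p) && decide (p ≤ 65536) && decide (p ≤ prev)
            && decide (cum + p ≤ 65536) && pvChainOk p (cum + p) (List.take k rest)) = false := by
          rcases h1 with h | h
          · simp [show ¬ (0 ≤ p) by omega]
          · simp [show ¬ (p ≤ 65536) by omega]
        rw [hf]
        rfl
      · rw [if_neg h1]
        by_cases h2 : prev < p
        · rw [if_pos h2]
          have hf : (decide (0 ≤ p) && decide (p ≤ 65536) && decide (p ≤ prev)
              && decide (cum + p ≤ 65536) && pvChainOk p (cum + p) (List.take k rest)) = false := by
            simp [show ¬ (p ≤ prev) by omega]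
          rw [hf]
          rfl
        · rw [if_neg h2]
          have hno3 : ¬ (9223372036854775807 - cum < p) := by omega
          rw [if_neg hno3]
          rw [if_neg (show ¬ (cum + p < cum) by omega)]
          by_cases h5 : 65536 < cum + p
          · rw [if_pos h5]
            have hf : (decide (0 ≤ p) && decide (p ≤ 65536) && decide (p ≤ prev)
                && decide (cum + p ≤ 65536) && pvChainOk p (cum + p) (List.take k rest)) = false := by
              simp [show ¬ (cum + p ≤ 65536) by omega]
            rw [hf]
            rfl
          · rw [if_neg h5]
            have hrec := ih rest (idx + 1) (cum + p)
              (if pfx < 0 ∧ cum + p ≥ top then (idx : Int) + 1 else pfx) p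
              (by simpa using Nat.le_of_succ_le_succ hlen) (by omega) (by omega)
            rw [hrec]
            have hok : (decide (0 ≤ p) && decide (p ≤ 65536) && decide (p ≤ prev)
                && decide (cum + p ≤ 65536)) = true := by
              simp only [Bool.and_eq_true, decide_eq_true_eq]; omega
            rw [show (decide (0 ≤ p) && decide (p ≤ 65536) && decide (p ≤ prev)
                && decide (cum + p ≤ 65536) && pvChainOk p (cum + p) (List.take k rest))
              = pvChainOk p (cum + p) (List.take k rest) by rw [hok]; simp]
            split
            · congr 1; ring
            · rfl

-- chainOk implies the three declarative facts B checks (except the total).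
theorem pvChain_nonneg : ∀ (xs : List Int) (prev cum : Int),
    pvChainOk prev cum xs = true → xs.any (fun p => decide (p < 0)) = false := by
  intro xs
  induction xs with
  | nil => intro _ _ _; rfl
  | cons p rest ih =>
    intro prev cum h
    simp only [pvChainOk, Bool.and_eq_true, decide_eq_true_eq] at h
    simp only [List.any_cons, Bool.or_eq_false_iff]
    exact ⟨by simp; omega, ih p (cum + p) h.2⟩

theorem pvChain_pairs : ∀ (xs : List Int) (prev cum : Int),
    pvChainOk prev cum xs = true →
    (xs.zip (xs.drop 1)).any (fun ab => decide (ab.1 < ab.2)) = false := by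
  intro xs
  induction xs with
  | nil => intro _ _ _; rfl
  | cons p rest ih =>
    intro prev cum h
    simp only [pvChainOk, Bool.and_eq_true, decide_eq_true_eq] at h
    cases rest with
    | nil => rfl
    | cons q r =>
      have h2 := h.2
      simp only [pvChainOk, Bool.and_eq_true, decide_eq_true_eq] at h2
      simp only [List.drop, List.zip, List.zipWith, List.any_cons, Bool.or_eq_false_iff]
      constructor
      · simp; omega
      · have := ih p (cum + p) h.2
        simpa using this

theorem pv_sum_nonneg : ∀ (xs : List Int),
    xs.any (fun p => decide (p < 0)) = false → 0 ≤ xs.sum := by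
  intro xs
  induction xs with
  | nil => intro _; simp
  | cons p rest ih =>
    intro h
    simp only [List.any_cons, Bool.or_eq_false_iff, decide_eq_false_iff_not] at h
    have := ih (by simpa using h.2)
    simp only [List.sum_cons]
    omega

-- Conversely, B's declarative facts plus total = ONE imply chainOk.
theorem pvChain_of : ∀ (xs : List Int) (prev cum : Int), 0 ≤ cum → cum + xs.sum = 65536 →
    xs.any (fun p => decide (p < 0)) = false →
    (xs.zip (xs.drop 1)).any (fun ab => decide (ab.1 < ab.2)) = false →
    (∀ p r, xs = p :: r → p ≤ prev ∨ prev = 65536) →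
    pvChainOk prev cum xs = true := by
  intro xs
  induction xs with
  | nil => intro _ _ _ _ _ _ _; rfl
  | cons p rest ih =>
    intro prev cum hc0 hsum hnn hzip hhd
    simp only [List.any_cons, Bool.or_eq_false_iff, decide_eq_false_iff_not] at hnn
    have hrest_nn : rest.any (fun p => decide (p < 0)) = false := by simpa using hnn.2
    have hrs : 0 ≤ rest.sum := pv_sum_nonneg rest hrest_nn
    simp only [List.sum_cons] at hsum
    have hp0 : 0 ≤ p := by omega
    have hple : cum + p ≤ 65536 := by omega
    have hp1 : p ≤ 65536 := by omega
    have hprev : p ≤ prev := by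
      rcases hhd p rest rfl with h | h
      · exact h
      · omega
    simp only [pvChainOk, Bool.and_eq_true, decide_eq_true_eq]
    refine ⟨⟨⟨⟨hp0, hp1⟩, hprev⟩, hple⟩, ?_⟩
    apply ih p (cum + p) (by omega) (by omega) hrest_nn
    · cases rest with
      | nil => rfl
      | cons q r =>
        simp only [List.drop, List.zip, List.zipWith, List.any_cons, Bool.or_eq_false_iff] at hzip
        simpa using hzip.2
    · intro q r hqr
      subst hqr
      simp only [List.drop, List.zip, List.zipWith, List.any_cons, Bool.or_eq_false_iff,
        decide_eq_false_iff_not] at hzip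
      exact Or.inl (by omega)

-- The post-loop code of A agrees with B's staged tail, given the loop characterisation.
theorem pv_final_eq (top lane : Int) (xs : List Int) (r : Int ⊕ (Int × Int))
    (hA : Sum.map id Prod.fst r
      = if pvChainOk 65536 0 xs then .inr ((0 : Int) + xs.sum) else .inl 2) :
    pvA_finish r lane = pvB_tail top lane xs := by
  unfold pvB_tail
  by_cases hch : pvChainOk 65536 0 xs = true
  · rw [if_pos hch] at hA
    cases r with
    | inl e => simp [Sum.map] at hA
    | inr q =>
      obtain ⟨cum, pfx⟩ := q
      simp [Sum.map] at hA
      rw [if_neg (show ¬ ((xs.any fun p => decide (p < 0)) = true) by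
            rw [pvChain_nonneg xs 65536 0 hch]; simp)]
      rw [if_neg (show ¬ (((xs.zip (xs.drop 1)).any fun ab => decide (ab.1 < ab.2)) = true) by
            rw [pvChain_pairs xs 65536 0 hch]; simp)]
      by_cases hs : xs.sum = 65536
      · rw [if_neg (show ¬ (xs.sum ≠ 65536) by omega)]
        simp [pvA_finish, hA, hs]
      · rw [if_pos hs]
        simp [pvA_finish, hA, hs]
  · rw [if_neg hch] at hA
    cases r with
    | inr q => simp [Sum.map] at hA
    | inl e =>
      simp [Sum.map] at hA
      subst hA
      by_cases hnn : (xs.any fun p => decide (p < 0)) = true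
      · rw [if_pos hnn]; rfl
      · rw [if_neg hnn]
        by_cases hz : ((xs.zip (xs.drop 1)).any fun ab => decide (ab.1 < ab.2)) = true
        · rw [if_pos hz]; rfl
        · rw [if_neg hz]
          by_cases hs : xs.sum = 65536
          · exact absurd (pvChain_of xs 65536 0 le_rfl (by omega)
              (by simpa using hnn) (by simpa using hz)
              (fun _ _ _ => Or.inr rfl)) hch
          · rw [if_pos hs]; rfl

-- ===== VERDICT (by name: the statement is the Claim_ definition above) =====
theorem fpq16_topp_select_prefix_len_checked_reference_spec : Claim_equal_fpq16_topp_select_prefix_len_checked_reference := by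
  intro probs_q16 lane_count top_p_q16 out_prefix_len probs_addr _dom _pre
  unfold Spec_fpq16_topp_select_prefix_len_checked_reference
  unfold fpq16_topp_select_prefix_len_checked_reference fpq16_topp_select_prefix_len_checked_reference_alt
  cases probs_q16 with
  | none => rfl
  | some probs =>
    cases out_prefix_len with
    | none => rfl
    | some out =>
      simp only []
      split_ifs with h1 h2 h3 h4 h5 <;> try rfl
      · have hfuel : lane_count.toNat ≤ probs.length := by omega
        have hA := pvA_loop_char top_p_q16 lane_count.toNat probs 0 0 (-1) 65536
          hfuel (le_refl 0) (by omega)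
        exact pv_final_eq top_p_q16 lane_count (probs.take lane_count.toNat) _ hA
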